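-- pv_equiv track=rewrite | github.com/goholtu203/Hands_on-6 | task4.py | check_attendance
-- ===== SOURCE A (Python) =====
-- def check_attendance(students, present_list):
-- 	student_status= {}
-- 	for student in students:
-- 		if student in present_list:
-- 			student_status.update({student:'Present'})
-- 		else:
-- 			student_status.update({student: 'Absent'})
-- 	return student_status
-- ===== SOURCE B (Python) =====
-- def check_attendance(students, present_list):
--     student_status = {name: 'Absent' for name in students}
--     roster = set(students)
--     for p in present_list:
--         if p in roster:
--             student_status[p] = 'Present'
--     return student_status
-- ===== Notes on version B (the rewrite author's own statement) =====
-- stated objective: faster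
-- what changed: Instead of scanning present_list for every student, B seeds every student to 'Absent' in one pass, then loops over present_list once overwriting members of a student set with 'Present'.
import Mathlib
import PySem

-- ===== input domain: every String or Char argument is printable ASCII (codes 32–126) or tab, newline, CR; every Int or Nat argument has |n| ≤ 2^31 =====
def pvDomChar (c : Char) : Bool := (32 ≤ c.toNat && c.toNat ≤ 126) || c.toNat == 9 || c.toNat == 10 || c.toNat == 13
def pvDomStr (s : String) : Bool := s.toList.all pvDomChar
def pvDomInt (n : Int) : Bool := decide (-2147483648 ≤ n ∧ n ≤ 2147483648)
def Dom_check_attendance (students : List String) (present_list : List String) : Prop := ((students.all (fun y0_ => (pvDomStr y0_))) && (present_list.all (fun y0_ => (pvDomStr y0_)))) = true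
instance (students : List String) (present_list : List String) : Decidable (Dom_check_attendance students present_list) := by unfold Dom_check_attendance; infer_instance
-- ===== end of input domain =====

-- B replaces A's per-student scan of present_list with one seeding pass ('Absent') plus one pass
-- over present_list overwriting set members with 'Present' (objective: faster).

-- ===== PORT A =====
def check_attendance (students : List String) (present_list : List String) : List (String × String) :=
  (students.foldl
    (fun d student =>
      if present_list.contains student then d.insert student "Present"
      else d.insert student "Absent")
    (PySem.Dict.empty : PySem.Dict String String)).items

-- ===== PORT B =====
def check_attendance_alt (students : List String) (present_list : List String) : List (String × String) :=
  let student_status :=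
    students.foldl (fun d name => d.insert name "Absent") (PySem.Dict.empty : PySem.Dict String String)
  let roster : PySem.Set String := PySem.Set.ofList students
  (present_list.foldl
    (fun d p => if roster.contains p then d.insert p "Present" else d)
    student_status).items

-- ===== PRECONDITION & SPEC =====
def Spec_check_attendance (students : List String) (present_list : List String) (out : List (String × String)) : Prop := out = check_attendance_alt students present_list
instance (students : List String) (present_list : List String) (out : List (String × String)) : Decidable (Spec_check_attendance students present_list out) := by unfold Spec_check_attendance; infer_instance

-- ===== CLAIM (what is proved, stated in full; the proofs are below) =====
def Claim_equal_check_attendance : Prop := ∀ (students : List String) (present_list : List String), Dom_check_attendance students present_list → Spec_check_attendance students present_list (check_attendance students present_list)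

-- ===== LEMMAS AND PROOFS =====

-- A fold inserting (k, f k) for each key keeps the dict of shape 'ks.map (fun k => (k, f k))',
-- extending the key list the way Set.add/Set.update does.
theorem foldl_insert_fun (f : String → String) (l : List String) :
    ∀ (ks : List String), ks.Nodup →
      l.foldl (fun d s => d.insert s (f s)) (PySem.Dict.mk (ks.map (fun k => (k, f k))))
        = PySem.Dict.mk ((PySem.Set.update ks l).map (fun k => (k, f k))) := by
  induction l with
  | nil => intro ks _; rfl
  | cons s l ih =>
    intro ks hnd
    have hc : (PySem.Dict.mk (ks.map (fun k => (k, f k)))).contains s = decide (s ∈ ks) := by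
      rw [PySem.Dict.contains_eq_decide_mem_keys]
      simp [PySem.Dict.keys]
    by_cases hmem : s ∈ ks
    · have hins : (PySem.Dict.mk (ks.map (fun k => (k, f k)))).insert s (f s)
          = PySem.Dict.mk (ks.map (fun k => (k, f k))) := by
        apply PySem.Dict.ext
        rw [PySem.Dict.items_insert_of_contains _ _ (by rw [hc]; simpa)]
        simp only [List.map_map]
        apply List.map_congr_left
        intro k _
        by_cases hks : k = s <;> simp [hks]
      have hadd : PySem.Set.add ks s = ks := by simp [PySem.Set.add, hmem]
      simp only [List.foldl_cons, hins]
      rw [ih ks hnd]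
      simp [PySem.Set.update, hadd]
    · have hins : (PySem.Dict.mk (ks.map (fun k => (k, f k)))).insert s (f s)
          = PySem.Dict.mk ((ks ++ [s]).map (fun k => (k, f k))) := by
        apply PySem.Dict.ext
        rw [PySem.Dict.items_insert_of_not_contains _ _ (by rw [hc]; simpa)]
        simp
      have hnd' : (ks ++ [s]).Nodup := by
        simp only [List.nodup_append, List.nodup_singleton, true_and, hnd]
        intro a ha b hb
        simp only [List.mem_singleton] at hb
        exact fun h => hmem ((hb ▸ h) ▸ ha)
      have hadd : PySem.Set.add ks s = ks ++ [s] := by simp [PySem.Set.add, hmem]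
      simp only [List.foldl_cons, hins]
      rw [ih (ks ++ [s]) hnd']
      simp [PySem.Set.update, hadd]

-- B's marking pass over a dict whose keys ARE the guard list rewrites each value pointwise.
theorem foldl_mark (ps : List String) :
    ∀ (ks : List String) (g : String → String), ks.Nodup →
      ps.foldl (fun d p => if PySem.Set.contains ks p then d.insert p "Present" else d)
          (PySem.Dict.mk (ks.map (fun k => (k, g k))))
        = PySem.Dict.mk (ks.map (fun k => (k, if ps.contains k then "Present" else g k))) := by
  induction ps with
  | nil => intro ks g _; simp
  | cons p ps ih =>
    intro ks g hnd
    by_cases hmem : p ∈ ks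
    · have hc : (PySem.Dict.mk (ks.map (fun k => (k, g k)))).contains p = true := by
        rw [PySem.Dict.contains_eq_decide_mem_keys]
        simp [PySem.Dict.keys, hmem]
      have hins : (PySem.Dict.mk (ks.map (fun k => (k, g k)))).insert p "Present"
          = PySem.Dict.mk (ks.map (fun k => (k, if k = p then "Present" else g k))) := by
        apply PySem.Dict.ext
        rw [PySem.Dict.items_insert_of_contains _ _ hc]
        simp only [List.map_map]
        apply List.map_congr_left
        intro k _
        by_cases hks : k = p <;> simp [hks]
      simp only [List.foldl_cons]
      rw [if_pos (by simpa [List.contains_iff_mem] using hmem), hins,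
        ih ks _ hnd]
      congr 1
      apply List.map_congr_left
      intro k _
      by_cases h1 : k ∈ ps <;> by_cases h2 : k = p <;>
        simp [h1, h2]
    · simp only [List.foldl_cons]
      rw [if_neg (by simpa [List.contains_iff_mem] using hmem), ih ks g hnd]
      congr 1
      apply List.map_congr_left
      intro k hk
      have hne : k ≠ p := fun h => hmem (h ▸ hk)
      by_cases h1 : k ∈ ps <;> simp [h1, hne]

-- ===== VERDICT (by name: the statement is the Claim_ definition above) =====
theorem check_attendance_spec : Claim_equal_check_attendance := by
  intro students present_list _
  unfold Spec_check_attendance check_attendance check_attendance_alt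
  have hofl : PySem.Set.ofList students = PySem.Set.update [] students := rfl
  have hnd : (PySem.Set.ofList students : List String).Nodup :=
    PySem.Set.nodup_ofList students
  have hA := foldl_insert_fun
      (fun s => if present_list.contains s then "Present" else "Absent") students [] (by simp)
  have hB := foldl_insert_fun (fun _ => "Absent") students [] (by simp)
  simp only [List.map_nil] at hA hB
  have hAfold : (students.foldl
      (fun d student => if present_list.contains student then d.insert student "Present"
        else d.insert student "Absent") (PySem.Dict.empty : PySem.Dict String String))
      = PySem.Dict.mk ((PySem.Set.ofList students).map
          (fun k => (k, if present_list.contains k then "Present" else "Absent"))) := by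
    rw [hofl, ← hA]
    congr 1
    funext d s
    by_cases h : s ∈ present_list <;> simp [h]
  have hBfold : (students.foldl (fun d name => d.insert name "Absent")
      (PySem.Dict.empty : PySem.Dict String String))
      = PySem.Dict.mk ((PySem.Set.ofList students).map (fun k => (k, "Absent"))) := by
    rw [hofl, ← hB]
    rfl
  show (students.foldl
      (fun d student => if present_list.contains student then d.insert student "Present"
        else d.insert student "Absent") PySem.Dict.empty).items
    = (present_list.foldl
        (fun d p => if (PySem.Set.ofList students).contains p then d.insert p "Present" else d)
        (students.foldl (fun d name => d.insert name "Absent") PySem.Dict.empty)).items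
  rw [hAfold, hBfold,
    foldl_mark present_list (PySem.Set.ofList students) (fun _ => "Absent") hnd]
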